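-- pv_equiv track=rewrite | github.com/dsprahul/CompetitveProgramming | 5_matching_brackets.py | len_of_max_sequence_and_point_of_occr
-- ===== SOURCE A (Python) =====
-- ONE = '1'
--
-- TWO = '2'
--
-- def len_of_max_sequence_and_point_of_occr(stream):
--
--     N = len(stream)
--     list_of_braces_meta = []
--
--     longest_known = 0
--     longest_known_loc = 0
--
--     for idx in range(N):
--
--         if stream[idx] == ONE:
--
--             bracket_object = {
--                 "location": idx,
--                 "containing-length": 0
--             }
--             list_of_braces_meta.append(bracket_object)
--
--         if stream[idx] == TWO:
--             # This made a pair, pop this open brace from queue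
--             # Check if the length of popped item > longest_known
--             # add 2 to content length of last open brace item after popping
--             most_recent_bracket_pair = list_of_braces_meta.pop()
--
--             most_recent_bracket_pair["containing-length"] += 2
--
--             if most_recent_bracket_pair["containing-length"] > longest_known:
--                 longest_known = most_recent_bracket_pair["containing-length"]
--                 longest_known_loc = most_recent_bracket_pair["location"]
--
--             if len(list_of_braces_meta) >= 1:
--                 list_of_braces_meta[-1]["containing-length"] += most_recent_bracket_pair["containing-length"]
--
--     return longest_known, longest_known_loc + 1
-- ===== SOURCE B (Python) =====
-- def len_of_max_sequence_and_point_of_occr(stream):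
--     # Single pass with a global bracket counter: each pair's length is computed
--     # directly from bracket-count differences instead of propagating child
--     # lengths up a stack of mutable records.
--     count = 0
--     stack = []
--     longest = 0
--     loc = 0
--     for idx, ch in enumerate(stream):
--         if ch == '1':
--             count += 1
--             stack.append((idx, count))
--         elif ch == '2':
--             count += 1
--             open_idx, open_count = stack.pop()
--             length = count - open_count + 1
--             if length > longest:
--                 longest = length
--                 loc = open_idx
--     return longest, loc + 1
-- ===== Notes on version B (the rewrite author's own statement) =====
-- stated objective: simpler
-- what changed: Replaces the stack of mutable per-bracket length records (with child-length propagation into the parent on every close) by a global bracket counter: each pair's length is the difference of bracket counts at push and pop, so no record is ever updated in place.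
import Mathlib
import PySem

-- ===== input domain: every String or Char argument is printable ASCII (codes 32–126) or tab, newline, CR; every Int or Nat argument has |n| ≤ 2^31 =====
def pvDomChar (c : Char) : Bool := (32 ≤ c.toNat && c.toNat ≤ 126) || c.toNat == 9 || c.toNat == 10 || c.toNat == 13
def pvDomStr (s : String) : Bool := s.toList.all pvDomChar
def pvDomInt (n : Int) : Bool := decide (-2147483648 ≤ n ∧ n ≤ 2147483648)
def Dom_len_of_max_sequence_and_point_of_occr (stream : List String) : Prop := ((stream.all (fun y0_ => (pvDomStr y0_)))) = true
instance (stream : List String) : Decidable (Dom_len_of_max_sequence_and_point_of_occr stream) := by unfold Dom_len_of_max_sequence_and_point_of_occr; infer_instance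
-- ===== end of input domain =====

-- B replaces A's stack of mutable per-bracket length records by a global bracket
-- counter (pair length = count difference at push/pop): simpler, same O(n) cost.


-- ===== PORT A =====
-- stack entries are (location, containing-length); the dict with fixed keys is a pair.
-- On '2' with an empty stack Python raises IndexError (excluded by Pre_); the port
-- skips the element there (value irrelevant outside Pre_).
def pvGoA : List String → Int → List (Int × Int) → Int → Int → Int × Int
  | [], _, _, longest, loc => (longest, loc + 1)
  | s :: rest, idx, stack, longest, loc =>
    if s = "1" then
      pvGoA rest (idx + 1) ((idx, 0) :: stack) longest loc
    else if s = "2" then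
      match stack with
      | [] => pvGoA rest (idx + 1) [] longest loc
      | (l, c) :: tail =>
        let c2 := c + 2
        let longest' := if c2 > longest then c2 else longest
        let loc' := if c2 > longest then l else loc
        let tail' := match tail with
          | [] => ([] : List (Int × Int))
          | (l2, cc) :: t2 => (l2, cc + c2) :: t2
        pvGoA rest (idx + 1) tail' longest' loc'
    else
      pvGoA rest (idx + 1) stack longest loc

def len_of_max_sequence_and_point_of_occr (stream : List String) : Int × Int :=
  pvGoA stream 0 [] 0 0

-- ===== PORT B =====
-- stack entries are (idx, bracket count at push); same empty-pop convention as above.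
def pvGoB : List String → Int → Int → List (Int × Int) → Int → Int → Int × Int
  | [], _, _, _, longest, loc => (longest, loc + 1)
  | s :: rest, idx, count, stack, longest, loc =>
    if s = "1" then
      pvGoB rest (idx + 1) (count + 1) ((idx, count + 1) :: stack) longest loc
    else if s = "2" then
      match stack with
      | [] => pvGoB rest (idx + 1) (count + 1) [] longest loc
      | (i, c) :: tail =>
        let len := (count + 1) - c + 1
        if len > longest then pvGoB rest (idx + 1) (count + 1) tail len i
        else pvGoB rest (idx + 1) (count + 1) tail longest loc
    else
      pvGoB rest (idx + 1) count stack longest loc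

def len_of_max_sequence_and_point_of_occr_alt (stream : List String) : Int × Int :=
  pvGoB stream 0 0 [] 0 0

-- ===== PRECONDITION & SPEC =====
-- A raises IndexError (pop from empty stack) exactly when some prefix of the stream
-- contains more "2" elements than "1" elements; Pre_ excludes those streams.
def Pre_len_of_max_sequence_and_point_of_occr (stream : List String) : Prop :=
  ∀ n : Fin (stream.length + 1),
    ((stream.take n).count "2") ≤ ((stream.take n).count "1")
instance (stream : List String) : Decidable (Pre_len_of_max_sequence_and_point_of_occr stream) := by unfold Pre_len_of_max_sequence_and_point_of_occr; infer_instance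

def pvWitness_len_of_max_sequence_and_point_of_occr : List String := ["1", "x", "1", "2", "2"]

def Spec_len_of_max_sequence_and_point_of_occr (stream : List String) (out : Int × Int) : Prop := out = len_of_max_sequence_and_point_of_occr_alt stream
instance (stream : List String) (out : Int × Int) : Decidable (Spec_len_of_max_sequence_and_point_of_occr stream out) := by unfold Spec_len_of_max_sequence_and_point_of_occr; infer_instance

-- ===== CLAIM (what is proved, stated in full; the proofs are below) =====
def Claim_equal_len_of_max_sequence_and_point_of_occr : Prop := ∀ (stream : List String), Dom_len_of_max_sequence_and_point_of_occr stream → Pre_len_of_max_sequence_and_point_of_occr stream → Spec_len_of_max_sequence_and_point_of_occr stream (len_of_max_sequence_and_point_of_occr stream)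

-- ===== LEMMAS AND PROOFS =====
-- Invariant tying A's stack (location, containing-length) to B's stack
-- (location, bracket count at push) under the current global count:
-- the top entry's containing-length equals count - pushCount; for an entry below
-- another, the role of `count` is played by (pushCount of the entry above) - 1.
def pvRel : Int → List (Int × Int) → List (Int × Int) → Prop
  | _, [], [] => True
  | count, (l, c) :: tA, (i, cb) :: tB => l = i ∧ c = count - cb ∧ pvRel (cb - 1) tA tB
  | _, _, _ => False

theorem pvRel_cons (count l c i cb : Int) (tA tB : List (Int × Int))
    (h1 : l = i) (h2 : c = count - cb) (h3 : pvRel (cb - 1) tA tB) :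
    pvRel count ((l, c) :: tA) ((i, cb) :: tB) := ⟨h1, h2, h3⟩

theorem pvRel_shift (count count' : Int) (tA tB : List (Int × Int))
    (h : count' = count) (hrel : pvRel count tA tB) : pvRel count' tA tB := by
  rw [h]; exact hrel

theorem pvGoA_eq_pvGoB (stream : List String) :
    ∀ (idx count : Int) (stA stB : List (Int × Int)) (longest loc : Int),
    pvRel count stA stB →
    pvGoA stream idx stA longest loc = pvGoB stream idx count stB longest loc := by
  induction stream with
  | nil => intro idx count stA stB longest loc _; rfl
  | cons s rest ih =>
    intro idx count stA stB longest loc hrel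
    by_cases h1 : s = "1"
    · simp only [pvGoA, pvGoB, if_pos h1]
      exact ih _ _ _ _ _ _
        (pvRel_cons _ _ _ _ _ _ _ rfl (by ring)
          (pvRel_shift _ _ _ _ (by ring) hrel))
    · by_cases h2 : s = "2"
      · simp only [pvGoA, pvGoB, if_neg h1, if_pos h2]
        match stA, stB, hrel with
        | [], [], _ => exact ih _ _ _ _ _ _ trivial
        | (l, c) :: tA, (i, cb) :: tB, ⟨hl, hc, htail⟩ =>
          have hlen : c + 2 = (count + 1) - cb + 1 := by omega
          subst hl
          simp only [hlen]
          by_cases hgt : (count + 1) - cb + 1 > longest <;>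
            [simp only [if_pos hgt]; simp only [if_neg hgt]] <;>
            (match tA, tB, htail with
             | [], [], _ => exact ih _ _ _ _ _ _ trivial
             | (l2, cc) :: t2, (i2, cb2) :: t2B, ⟨hl2, hc2, ht2⟩ =>
               exact ih _ _ _ _ _ _ (pvRel_cons _ _ _ _ _ _ _ hl2 (by omega) ht2))
      · simp only [pvGoA, pvGoB, if_neg h1, if_neg h2]
        exact ih _ _ _ _ _ _ hrel

-- ===== VERDICT (by name: the statement is the Claim_ definition above) =====
theorem len_of_max_sequence_and_point_of_occr_spec : Claim_equal_len_of_max_sequence_and_point_of_occr := by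
  intro stream _ _
  unfold Spec_len_of_max_sequence_and_point_of_occr
  unfold len_of_max_sequence_and_point_of_occr len_of_max_sequence_and_point_of_occr_alt
  exact pvGoA_eq_pvGoB stream 0 0 [] [] 0 0 trivial
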